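-- pv_equiv track=rewrite | github.com/ohigusu/Coding-study2_programmers | 프로그래머스/1/42840. 모의고사/모의고사.py | solution
-- ===== SOURCE A (Python) =====
-- def solution(answers):
--     answer, dic, pre = [], {}, 0
--     dic[1] = [1, 2, 3, 4, 5]
--     dic[2] = [2, 1, 2, 3, 2, 4, 2, 5]
--     dic[3] = [3, 3, 1, 1, 2, 2, 4, 4, 5, 5]
--
--     for key, value in dic.items():
--         cand = value * (len(answers)//len(value)) + value[:(len(answers)%len(value))]
--         cnt = sum(1 for i, j in zip(answers, cand) if i == j)
--
--         if cnt > pre: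
--             pre = cnt
--             answer = [key]
--         elif cnt == pre:
--             answer.append(key)
--
--     return answer
-- ===== SOURCE B (Python) =====
-- def solution(answers):
--     patterns = [[1, 2, 3, 4, 5],
--                 [2, 1, 2, 3, 2, 4, 2, 5],
--                 [3, 3, 1, 1, 2, 2, 4, 4, 5, 5]]
--     # 40 = lcm(5, 8, 10): the residue i % 40 determines every pattern's value at i.
--     cnt = {}
--     for i, a in enumerate(answers):
--         k = (i % 40, a)
--         cnt[k] = cnt.get(k, 0) + 1
--     scores = [sum(cnt.get((r, p[r % len(p)]), 0) for r in range(40)) for p in patterns]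
--     mx = max(scores)
--     return [i + 1 for i in range(3) if scores[i] == mx]
-- ===== Notes on version B (the rewrite author's own statement) =====
-- stated objective: alternative
-- what changed: B replaces A's per-pattern tiled-candidate construction with a running max by a single counting pass that builds a dict keyed by (i % 40, answers[i]) (40 = lcm of the pattern lengths, so the residue determines each pattern's value), then computes each pattern's score as a sum of 40 dict lookups and selects the winners by comparing against max(scores) in a separate step.
import Mathlib
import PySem

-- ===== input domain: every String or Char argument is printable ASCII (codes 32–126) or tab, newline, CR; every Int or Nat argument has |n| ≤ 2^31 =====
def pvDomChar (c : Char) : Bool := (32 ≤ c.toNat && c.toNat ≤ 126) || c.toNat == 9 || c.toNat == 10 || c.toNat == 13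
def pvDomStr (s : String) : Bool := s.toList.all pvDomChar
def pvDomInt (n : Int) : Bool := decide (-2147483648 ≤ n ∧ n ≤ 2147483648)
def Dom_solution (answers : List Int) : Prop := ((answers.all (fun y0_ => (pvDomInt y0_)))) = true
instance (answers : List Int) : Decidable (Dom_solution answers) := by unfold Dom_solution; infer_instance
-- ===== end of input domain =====

-- B replaces A's per-pattern tiled-candidate lists and running max by one counting pass over a
-- dict keyed by (i % 40, answers[i]) plus per-pattern lookup sums and a separate max-selection
-- (objective: alternative).

-- ===== PORT A =====
-- cnt = sum(1 for i, j in zip(answers, cand) if i == j)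
def pvACnt (answers cand : List Int) : Int :=
  (answers.zip cand).foldl (fun acc ij => acc + if ij.1 = ij.2 then 1 else 0) 0

-- cand = value * (len(answers)//len(value)) + value[:(len(answers)%len(value))]
def pvCand (answers value : List Int) : List Int :=
  PySem.List.pyRepeat value (PySem.Int.floordiv (answers.length : Int) (value.length : Int))
    ++ PySem.List.slice value none (some (PySem.Int.mod (answers.length : Int) (value.length : Int)))

-- the body of A's for-loop over dic.items()
def pvAStep (answers : List Int) (st : List Int × Int) (kv : Int × List Int) : List Int × Int :=
  let cnt := pvACnt answers (pvCand answers kv.2)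
  if cnt > st.2 then ([kv.1], cnt)
  else if cnt = st.2 then (st.1 ++ [kv.1], st.2)
  else st

def solution (answers : List Int) : List Int :=
  ([((1 : Int), ([1, 2, 3, 4, 5] : List Int)),
    (2, [2, 1, 2, 3, 2, 4, 2, 5]),
    (3, [3, 3, 1, 1, 2, 2, 4, 4, 5, 5])].foldl (pvAStep answers) ([], 0)).1

-- ===== PORT B =====
def pvPatterns : List (List Int) :=
  [[1, 2, 3, 4, 5], [2, 1, 2, 3, 2, 4, 2, 5], [3, 3, 1, 1, 2, 2, 4, 4, 5, 5]]

-- the counting loop: cnt[k] = cnt.get(k, 0) + 1 with k = (i % 40, a)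
def pvBCnt (answers : List Int) : PySem.Dict (Int × Int) Int :=
  -- Source B's local name k = (i % 40, a) is inlined
  (PySem.List.enumerate answers).foldl
    (fun d ia =>
      d.insert (PySem.Int.mod ia.1 40, ia.2)
        (d.getD (PySem.Int.mod ia.1 40, ia.2) 0 + 1))
    PySem.Dict.empty

-- sum(cnt.get((r, p[r % len(p)]), 0) for r in range(40))
def pvBScore (cnt : PySem.Dict (Int × Int) Int) (p : List Int) : Int :=
  ((PySem.List.pyRange 0 40 1).map
    (fun r => cnt.getD (r, PySem.List.pyGetD p (PySem.Int.mod r (p.length : Int)) 0) 0)).sum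

def solution_alt (answers : List Int) : List Int :=
  let cnt := pvBCnt answers
  let scores := pvPatterns.map (pvBScore cnt)
  -- mx = max(scores): scores always has three elements, so max? is some and the default is unreachable
  let mx := (PySem.List.max? scores (fun x => x)).getD 0
  ((PySem.List.pyRange 0 3 1).filter
    (fun i => PySem.List.pyGetD scores i 0 == mx)).map (· + 1)

-- ===== PRECONDITION & SPEC =====
def Spec_solution (answers : List Int) (out : List Int) : Prop := out = solution_alt answers
instance (answers : List Int) (out : List Int) : Decidable (Spec_solution answers out) := by unfold Spec_solution; infer_instance

-- ===== CLAIM (what is proved, stated in full; the proofs are below) =====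
def Claim_equal_solution : Prop := ∀ (answers : List Int), Dom_solution answers → Spec_solution answers (solution answers)

-- ===== LEMMAS AND PROOFS =====

-- number of indices j with answers[j] = p[(k+j) % |p|]
def pvMC (p : List Int) : Nat → List Int → Int
  | _, [] => 0
  | k, a :: rest => (if a = p.getD (k % p.length) 0 then 1 else 0) + pvMC p (k + 1) rest

theorem pvMC_nonneg (p : List Int) (k : Nat) (answers : List Int) : 0 ≤ pvMC p k answers := by
  induction answers generalizing k with
  | nil => simp [pvMC]
  | cons a rest ih =>
    have := ih (k + 1)
    simp only [pvMC]
    split <;> omega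

-- ---- A side: the zip count over the tiled candidate is the modulo match count ----

-- generic zip-count lemma: if cand agrees with p[(k+j) % |p|] positionwise, the zip count is pvMC
theorem pvACnt_gen (p : List Int) :
    ∀ (answers cand : List Int) (k : Nat) (acc : Int),
      answers.length ≤ cand.length →
      (∀ j : Nat, j < answers.length → cand.getD j 0 = p.getD ((k + j) % p.length) 0) →
      (answers.zip cand).foldl (fun acc ij => acc + if ij.1 = ij.2 then 1 else 0) acc
        = acc + pvMC p k answers := by
  intro answers
  induction answers with
  | nil => intro cand k acc _ _; simp [pvMC]
  | cons a rest ih =>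
    intro cand k acc hlen hidx
    cases cand with
    | nil => simp at hlen
    | cons c ct =>
      have hc : c = p.getD (k % p.length) 0 := by
        have := hidx 0 (by simp)
        simpa using this
      have hrest : ∀ j : Nat, j < rest.length → ct.getD j 0 = p.getD ((k + 1 + j) % p.length) 0 := by
        intro j hj
        have := hidx (j + 1) (by simpa using Nat.succ_lt_succ hj)
        simpa [Nat.add_assoc, Nat.add_comm 1 j, Nat.add_left_comm] using this
      have hlen' : rest.length ≤ ct.length := by simpa using hlen
      rw [List.zip_cons_cons, List.foldl_cons,
          ih ct (k + 1) (acc + if a = c then 1 else 0) hlen' hrest]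
      simp only [pvMC, hc]
      split <;> omega

-- flatten-replicate + take indexes as modulo
theorem pvRepGet (p : List Int) (_hm : 0 < p.length) :
    ∀ (q r j : Nat), r ≤ p.length → j < q * p.length + r →
      ((List.replicate q p).flatten ++ p.take r).getD j 0 = p.getD (j % p.length) 0 := by
  intro q
  induction q with
  | zero =>
    intro r j hr hj
    simp only [Nat.zero_mul, Nat.zero_add] at hj
    have hjm : j % p.length = j := Nat.mod_eq_of_lt (lt_of_lt_of_le hj hr)
    rw [hjm]
    simp only [List.replicate, List.flatten_nil, List.nil_append]
    rw [List.getD_eq_getElem?_getD, List.getD_eq_getElem?_getD,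
        List.getElem?_take_of_lt hj]
  | succ q ihq =>
    intro r j hr hj
    rw [List.replicate_succ, List.flatten_cons, List.append_assoc]
    by_cases hjp : j < p.length
    · rw [List.getD_append p _ 0 j hjp, Nat.mod_eq_of_lt hjp]
    · push_neg at hjp
      have hexp : (q + 1) * p.length = q * p.length + p.length := by ring
      have hlt : j - p.length < q * p.length + r := by omega
      have hmodeq : j % p.length = (j - p.length) % p.length := by
        conv_lhs => rw [show j = p.length + (j - p.length) by omega]
        exact Nat.add_mod_left _ _
      rw [List.getD_append_right p _ 0 j hjp, ihq r (j - p.length) hr hlt, hmodeq]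

theorem pvCand_eq (answers value : List Int) (_hv : 0 < value.length) :
    pvCand answers value
      = (List.replicate (answers.length / value.length) value).flatten
          ++ value.take (answers.length % value.length) := by
  unfold pvCand PySem.List.pyRepeat
  rw [PySem.Int.floordiv_natCast, PySem.Int.mod_natCast, PySem.List.slice_to_natCast,
      Int.toNat_natCast]

theorem pvCnt_eq (answers value : List Int) (hv : 0 < value.length) :
    pvACnt answers (pvCand answers value) = pvMC value 0 answers := by
  have hcomm : value.length * (answers.length / value.length)
      = (answers.length / value.length) * value.length := Nat.mul_comm _ _
  have hdm : value.length * (answers.length / value.length) + answers.length % value.length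
      = answers.length := Nat.div_add_mod answers.length value.length
  have hmod : answers.length % value.length < value.length := Nat.mod_lt _ hv
  have hlen : answers.length ≤ (pvCand answers value).length := by
    rw [pvCand_eq answers value hv]
    simp only [List.length_append, List.length_flatten, List.map_replicate,
      List.sum_replicate, smul_eq_mul, List.length_take,
      Nat.min_eq_left (Nat.le_of_lt hmod)]
    omega
  have hidx : ∀ j : Nat, j < answers.length →
      (pvCand answers value).getD j 0 = value.getD ((0 + j) % value.length) 0 := by
    intro j hj
    rw [pvCand_eq answers value hv, Nat.zero_add]
    exact pvRepGet value hv _ _ j (Nat.le_of_lt hmod) (by omega)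
  have := pvACnt_gen value answers (pvCand answers value) 0 0 hlen hidx
  simpa [pvACnt] using this

-- ---- B side: the residue-keyed counter sums to the same modulo match count ----

-- the pattern value B looks up for residue r: p[r % len(p)]
def pvF (p : List Int) (r : Int) : Int :=
  PySem.List.pyGetD p (PySem.Int.mod r (p.length : Int)) 0

-- the list of keys (i % 40, answers[i]) fed to the counter, enumerating from k
def pvKeyed (answers : List Int) (k : Int) : List (Int × Int) :=
  (PySem.List.enumerate answers k).map (fun ia => (PySem.Int.mod ia.1 40, ia.2))

-- B's 40-lookup score expressed as counts over the keyed list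
def pvScoreL (p : List Int) (keyed : List (Int × Int)) : Int :=
  ((PySem.List.pyRange 0 40 1).map (fun r => ((keyed.count (r, pvF p r) : Nat) : Int))).sum

-- sum of a (r, f r) = (r0, a) indicator over a list not containing r0 is 0
theorem pvSumIndZero (f : Int → Int) (a r0 : Int) :
    ∀ (l : List Int), r0 ∉ l →
      (l.map (fun r => if (r, f r) = (r0, a) then (1 : Int) else 0)).sum = 0 := by
  intro l
  induction l with
  | nil => simp
  | cons x t ih =>
    intro hx
    have hxt : r0 ∉ t := fun h => hx (List.mem_cons_of_mem _ h)
    have hxr : ¬((x, f x) = (r0, a)) := by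
      intro h
      injection h with h1 h2
      exact hx (by rw [← h1]; simp)
    rw [List.map_cons, List.sum_cons, if_neg hxr, ih hxt]
    ring

-- sum of the indicator over a nodup list containing r0 picks exactly the r0 term
theorem pvSumInd (f : Int → Int) (a r0 : Int) :
    ∀ (l : List Int), l.Nodup → r0 ∈ l →
      (l.map (fun r => if (r, f r) = (r0, a) then (1 : Int) else 0)).sum
        = if f r0 = a then 1 else 0 := by
  intro l
  induction l with
  | nil => intro _ h; simp at h
  | cons x t ih =>
    intro hnd hmem
    rw [List.map_cons, List.sum_cons]
    by_cases hx : r0 = x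
    · subst hx
      rw [pvSumIndZero f a r0 t (List.nodup_cons.mp hnd).1]
      by_cases hfa : f r0 = a
      · rw [if_pos (by rw [hfa]), if_pos hfa]; ring
      · rw [if_neg (fun h => hfa (Prod.ext_iff.mp h).2), if_neg hfa]; ring
    · have hmem' : r0 ∈ t := by
        rcases List.mem_cons.mp hmem with h | h
        · exact absurd h hx
        · exact h
      rw [if_neg (fun h => hx ((Prod.ext_iff.mp h).1).symm),
          ih (List.nodup_cons.mp hnd).2 hmem']
      ring

-- prepending one key (c, a), c a residue in range(40), adds its match indicator to the score
theorem pvScoreL_cons (p : List Int) (c a : Int) (keyed : List (Int × Int))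
    (hc : c ∈ PySem.List.pyRange 0 40 1) :
    pvScoreL p ((c, a) :: keyed) = (if pvF p c = a then 1 else 0) + pvScoreL p keyed := by
  unfold pvScoreL
  have hsplit : ∀ r ∈ PySem.List.pyRange 0 40 1,
      ((((c, a) :: keyed).count (r, pvF p r) : Nat) : Int)
        = ((keyed.count (r, pvF p r) : Nat) : Int)
          + (if (r, pvF p r) = (c, a) then (1 : Int) else 0) := by
    intro r _
    rw [List.count_cons]
    by_cases h : (r, pvF p r) = (c, a)
    · simp [h]
    · simp [h]
      intro hcr hfa
      exact h (by rw [hcr, hfa])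
  rw [List.map_congr_left hsplit, PySem.List.sum_map_add_int,
      pvSumInd (pvF p) a c (PySem.List.pyRange 0 40 1) (by decide) hc]
  ring

-- B's 40-lookup sum for pattern p over answers enumerated from k is the modulo match count
theorem pvBSum (p : List Int) (hdvd : p.length ∣ 40) :
    ∀ (answers : List Int) (k : Nat),
      pvScoreL p (pvKeyed answers (k : Int)) = pvMC p k answers := by
  intro answers
  induction answers with
  | nil =>
    intro k
    simp [pvKeyed, PySem.List.enumerate, pvScoreL, pvMC]
  | cons a rest ih =>
    intro k
    have hk : pvKeyed (a :: rest) (k : Int)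
        = ((((k % 40 : Nat)) : Int), a) :: pvKeyed rest ((k + 1 : Nat) : Int) := by
      unfold pvKeyed
      rw [PySem.List.enumerate_cons, List.map_cons,
          show (k : Int) + 1 = ((k + 1 : Nat) : Int) by push_cast; ring]
      congr 1
      simp only []
      congr 1
      exact_mod_cast PySem.Int.mod_natCast k 40
    have hmem : ((((k % 40 : Nat)) : Int)) ∈ PySem.List.pyRange 0 40 1 := by
      rw [PySem.List.mem_pyRange_one]
      constructor
      · positivity
      · exact_mod_cast Nat.mod_lt k (by norm_num)
    have hf : pvF p ((((k % 40 : Nat)) : Int)) = p.getD (k % p.length) 0 := by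
      unfold pvF
      rw [show PySem.Int.mod ((((k % 40 : Nat)) : Int)) (p.length : Int)
            = ((((k % 40) % p.length : Nat)) : Int) from
          by exact_mod_cast PySem.Int.mod_natCast (k % 40) p.length,
        Nat.mod_mod_of_dvd k hdvd, PySem.List.pyGetD_natCast]
    rw [hk, pvScoreL_cons p _ a _ hmem, ih (k + 1), hf]
    simp only [pvMC]
    by_cases h : a = p.getD (k % p.length) 0
    · rw [if_pos h.symm, if_pos h]
    · rw [if_neg (fun he => h he.symm), if_neg h]

-- counter lookups: pvBCnt's getD is the count in the residue-keyed list
theorem pvBCnt_eq (answers : List Int) :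
    pvBCnt answers
      = (pvKeyed answers 0).foldl (fun d x => d.insert x (d.getD x 0 + 1)) PySem.Dict.empty := by
  unfold pvBCnt pvKeyed
  rw [List.foldl_map]

theorem pvBCnt_getD (answers : List Int) (v : Int × Int) :
    (pvBCnt answers).getD v 0 = (((pvKeyed answers 0).count v : Nat) : Int) := by
  rw [pvBCnt_eq, PySem.Dict.getD_foldl_insert_add_one]
  simp [PySem.Dict.empty, PySem.Dict.getD, PySem.Dict.get?]

-- the shape of one iteration of A's running-max loop
def pvSelStep (st : List Int × Int) (k c : Int) : List Int × Int :=
  if c > st.2 then ([k], c) else if c = st.2 then (st.1 ++ [k], st.2) else st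

theorem pvAStep_eq (answers : List Int) (st : List Int × Int) (k : Int) (p : List Int) :
    pvAStep answers st (k, p) = pvSelStep st k (pvACnt answers (pvCand answers p)) := rfl

-- evaluating one selection step on a literal state
theorem pvSelStep_eval (l : List Int) (m k c : Int) :
    pvSelStep (l, m) k c
      = if c > m then ([k], c) else if c = m then (l ++ [k], m) else (l, m) := rfl

-- running-max-with-ties over three nonnegative scores = B's filter-by-max over range(3)
set_option maxRecDepth 4096 in
theorem pvSel_eq (c1 c2 c3 : Int) (h1 : 0 ≤ c1) :
    (pvSelStep (pvSelStep (pvSelStep ([], 0) 1 c1) 2 c2) 3 c3).1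
      = ((PySem.List.pyRange 0 3 1).filter
          (fun i => PySem.List.pyGetD [c1, c2, c3] i 0
            == (PySem.List.max? [c1, c2, c3] (fun x => x)).getD 0)).map (· + 1) := by
  have hr : PySem.List.pyRange 0 3 1 = [0, 1, 2] := by decide
  have hmax : (PySem.List.max? [c1, c2, c3] (fun x => x)).getD 0 = max (max c1 c2) c3 := by
    rw [PySem.List.max?_id_cons]
    simp only [List.foldl_cons, List.foldl_nil, Option.getD_some]
  have hg0 : PySem.List.pyGetD [c1, c2, c3] 0 0 = c1 := by
    simp [PySem.List.pyGetD]
  have hg1 : PySem.List.pyGetD [c1, c2, c3] 1 0 = c2 := by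
    simp [PySem.List.pyGetD]
  have hg2 : PySem.List.pyGetD [c1, c2, c3] 2 0 = c3 := by
    simp [PySem.List.pyGetD]
  have hs1 : pvSelStep ([], 0) 1 c1 = ([1], c1) := by
    rw [pvSelStep_eval]
    split_ifs with ha hb
    · rfl
    · simp [← hb]
    · exfalso; omega
  rw [hr]
  simp only [List.filter_cons, List.filter_nil, hmax, hg0, hg1, hg2, beq_iff_eq]
  rw [hs1]
  by_cases h12 : c2 > c1
  · rw [show pvSelStep ([1], c1) 2 c2 = ([2], c2) from by
        rw [pvSelStep_eval, if_pos h12],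
      pvSelStep_eval]
    split_ifs <;> first | rfl | (exfalso; omega)
  · by_cases h12e : c2 = c1
    · rw [show pvSelStep ([1], c1) 2 c2 = ([1, 2], c1) from by
          rw [pvSelStep_eval, if_neg h12, if_pos h12e]; rfl,
        pvSelStep_eval]
      split_ifs <;> first | rfl | (exfalso; omega)
    · rw [show pvSelStep ([1], c1) 2 c2 = ([1], c1) from by
          rw [pvSelStep_eval, if_neg h12, if_neg h12e],
        pvSelStep_eval]
      split_ifs <;> first | rfl | (exfalso; omega)

-- ===== VERDICT (by name: the statement is the Claim_ definition above) =====
theorem solution_spec : Claim_equal_solution := by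
  intro answers _
  show solution answers = solution_alt answers
  have hA : solution answers
      = (pvSelStep (pvSelStep (pvSelStep ([], 0) 1 (pvMC [1, 2, 3, 4, 5] 0 answers))
          2 (pvMC [2, 1, 2, 3, 2, 4, 2, 5] 0 answers))
          3 (pvMC [3, 3, 1, 1, 2, 2, 4, 4, 5, 5] 0 answers)).1 := by
    simp only [solution, List.foldl_cons, List.foldl_nil, pvAStep_eq]
    rw [pvCnt_eq answers [1, 2, 3, 4, 5] (by simp),
        pvCnt_eq answers [2, 1, 2, 3, 2, 4, 2, 5] (by simp),
        pvCnt_eq answers [3, 3, 1, 1, 2, 2, 4, 4, 5, 5] (by simp)]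
  have hScore : ∀ p : List Int, p.length ∣ 40 →
      pvBScore (pvBCnt answers) p = pvMC p 0 answers := by
    intro p hdvd
    have hb : pvBScore (pvBCnt answers) p = pvScoreL p (pvKeyed answers 0) := by
      unfold pvBScore pvScoreL pvF
      exact congrArg List.sum (List.map_congr_left (fun r _ => by rw [pvBCnt_getD]))
    have hs := pvBSum p hdvd answers 0
    rw [Nat.cast_zero] at hs
    rw [hb, hs]
  have hB : solution_alt answers
      = ((PySem.List.pyRange 0 3 1).filter
          (fun i => PySem.List.pyGetD
            [pvMC [1, 2, 3, 4, 5] 0 answers, pvMC [2, 1, 2, 3, 2, 4, 2, 5] 0 answers,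
             pvMC [3, 3, 1, 1, 2, 2, 4, 4, 5, 5] 0 answers] i 0
            == (PySem.List.max?
                 [pvMC [1, 2, 3, 4, 5] 0 answers, pvMC [2, 1, 2, 3, 2, 4, 2, 5] 0 answers,
                  pvMC [3, 3, 1, 1, 2, 2, 4, 4, 5, 5] 0 answers] (fun x => x)).getD 0)).map
          (· + 1) := by
    simp only [solution_alt, pvPatterns, List.map_cons, List.map_nil]
    rw [hScore [1, 2, 3, 4, 5] (by norm_num),
        hScore [2, 1, 2, 3, 2, 4, 2, 5] (by norm_num),
        hScore [3, 3, 1, 1, 2, 2, 4, 4, 5, 5] (by norm_num)]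
  rw [hA, hB, pvSel_eq _ _ _ (pvMC_nonneg _ _ _)]
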